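-- pv_equiv track=rewrite | github.com/ChoiYoo/Practice | ZB/3차/3차_4번.py | solution
-- ===== SOURCE A (Python) =====
-- from itertools import combinations
--
-- def check(dict, result):
--     for i in range(len(dict)):
--         for j in dict[i+1]:
--             if result == j:
--                 return i
--     return -1
--
-- def solution(numbers, target):
--     hap_list = {}
--     for i in range(len(numbers)):
--         c_list = combinations(numbers, i+1)
--         hap_list[i+1] = []
--         for c in c_list:
--             hap_list[i+1].append(sum(c))
--         hap_list[i+1].sort(reverse=True)
--         for h in hap_list[i+1]:
--             if h == 0:
--                 continue
--             if target % h == 0: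
--                 result = target // h
--                 c = check(hap_list, result)
--                 if c == -1:
--                     answer = result * (i+1)
--                     return answer
--                 else:
--                     answer = c * (i+1)
--                     return answer
--     answer = -1
--     return answer
-- ===== SOURCE B (Python) =====
-- def solution(numbers, target):
--     n = len(numbers)
--     # dynamic programme over suffixes: prev[i] = sums of (k-1)-element subsets of numbers[i:]
--     prev = [[0]] * (n + 1)
--     top = []  # top[j-1] = sums of j-element subsets of the whole list, for the sizes built so far
--     for k in range(1, n + 1):
--         cur = [[] for _ in range(n + 1)]
--         for i in range(n - 1, -1, -1):
--             if k <= n - i: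
--                 cur[i] = [numbers[i] + s for s in prev[i + 1]] + cur[i + 1]
--         row = cur[0]
--         top.append(row)
--         cands = [h for h in row if h != 0 and target % h == 0]
--         if cands:
--             h = max(cands)
--             r = target // h
--             for j in range(1, k + 1):
--                 if r in top[j - 1]:
--                     return (j - 1) * k
--             return r * k
--         prev = cur
--     return -1
-- ===== Notes on version B (the rewrite author's own statement) =====
-- stated objective: alternative
-- what changed: Replaces per-size itertools.combinations enumeration + in-place sort + sorted scan (plus the dict-scanning check helper) by a suffix dynamic programme that builds the exact-size subset-sum lists once per size, picking the divisor as max of a filter and the check index by a direct smallest-size membership scan.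
import Mathlib
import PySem

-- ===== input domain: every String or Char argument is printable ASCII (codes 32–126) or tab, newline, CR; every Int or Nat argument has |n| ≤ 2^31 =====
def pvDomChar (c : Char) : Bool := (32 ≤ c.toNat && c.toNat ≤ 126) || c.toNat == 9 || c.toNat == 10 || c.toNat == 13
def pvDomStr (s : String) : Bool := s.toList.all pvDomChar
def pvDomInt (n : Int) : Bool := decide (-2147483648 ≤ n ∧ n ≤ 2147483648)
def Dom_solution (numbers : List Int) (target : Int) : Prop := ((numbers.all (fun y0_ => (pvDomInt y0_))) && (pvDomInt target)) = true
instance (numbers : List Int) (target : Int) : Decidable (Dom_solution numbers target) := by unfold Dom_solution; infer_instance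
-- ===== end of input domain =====

-- B replaces A's per-size combinations enumeration + sort + sorted scan by a suffix
-- dynamic programme over exact subset sizes with a max-of-filter; objective: alternative algorithm.


-- ===== PORT A =====
-- check(dict, result): for i in range(len(dict)): for j in dict[i+1]: if result == j: return i; return -1
-- (the inner 'for j … if result == j' scan is the membership test List.contains)
def checkGo (d : PySem.Dict Int (List Int)) (result : Int) : List Nat → Int
  | [] => -1
  | i :: is => if (d.getD ((i : Int) + 1) []).contains result then (i : Int) else checkGo d result is

def check (d : PySem.Dict Int (List Int)) (result : Int) : Int :=
  checkGo d result (List.range d.size)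

-- the 'for h in hap_list[i+1]' scan with its continue / early returns
def scanA (hap : PySem.Dict Int (List Int)) (target : Int) (size : Nat) : List Int → Option Int
  | [] => none
  | h :: hs =>
    if h = 0 then scanA hap target size hs
    else if PySem.Int.mod target h = 0 then
      let result := PySem.Int.floordiv target h
      let c := check hap result
      some (if c = -1 then result * (size : Int) else c * (size : Int))
    else scanA hap target size hs

-- the 'for i in range(len(numbers))' loop, with hap_list threaded through
def loopA (numbers : List Int) (target : Int) : List Nat → PySem.Dict Int (List Int) → Int
  | [], _ => -1
  | i :: is, hap =>
    let sums := (PySem.List.combinations numbers (i + 1)).foldl (fun acc c => acc ++ [c.sum]) []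
    let sortedL := PySem.List.sorted sums (fun y => y) true
    let hap' := hap.insert ((i : Int) + 1) sortedL
    match scanA hap' target (i + 1) sortedL with
    | some ans => ans
    | none => loopA numbers target is hap'

def solution (numbers : List Int) (target : Int) : Int :=
  loopA numbers target (List.range numbers.length) PySem.Dict.empty

-- ===== PORT B =====
-- the 'for i in range(n-1, -1, -1)' pass building cur from prev: cur and prev are read
-- suffix-aligned, so the descending index loop is the structural recursion on the suffix
def rowB (k : Nat) : List Int → List (List Int) → List (List Int)
  | [], _ => [[]]
  | x :: rest, prev =>
    let tailRows := rowB k rest prev.tail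
    (if k ≤ rest.length + 1 then (prev.tail.headD []).map (fun s => x + s) ++ tailRows.headD [] else [])
      :: tailRows

-- the 'for j in range(1, k+1): if r in top[j-1]' scan
def findJ (r : Int) : List (List Int) → Nat → Option Nat
  | [], _ => none
  | row :: rest, j => if row.contains r then some j else findJ r rest (j + 1)

-- the 'for k in range(1, n+1)' loop of Source B
def loopB (numbers : List Int) (target : Int) : List Nat → List (List Int) → List (List Int) → Int
  | [], _, _ => -1
  | k :: ks, prev, top =>
    let cur := rowB k numbers prev
    let row := cur.headD []
    let top' := top ++ [row]
    let cands := row.filter (fun h => decide (h ≠ 0) && decide (PySem.Int.mod target h = 0))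
    if cands.isEmpty then loopB numbers target ks cur top'
    else
      let h := (PySem.List.max? cands (fun y => y)).getD 0
      let r := PySem.Int.floordiv target h
      match findJ r top' 1 with
      | some j => ((j : Int) - 1) * (k : Int)
      | none => r * (k : Int)

def solution_alt (numbers : List Int) (target : Int) : Int :=
  loopB numbers target (List.range' 1 numbers.length)
    (List.replicate (numbers.length + 1) [0]) []

-- ===== PRECONDITION & SPEC =====
def Spec_solution (numbers : List Int) (target : Int) (out : Int) : Prop := out = solution_alt numbers target
instance (numbers : List Int) (target : Int) (out : Int) : Decidable (Spec_solution numbers target out) := by unfold Spec_solution; infer_instance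

-- ===== CLAIM (what is proved, stated in full; the proofs are below) =====
def Claim_equal_solution : Prop := ∀ (numbers : List Int) (target : Int), Dom_solution numbers target → Spec_solution numbers target (solution numbers target)

-- ===== LEMMAS AND PROOFS =====

-- abbreviation used only in the proofs: the sums of the size-j combinations
def SA (numbers : List Int) (j : Nat) : List Int := (PySem.List.combinations numbers j).map (·.sum)

theorem headD_map_tails {α : Type} (f : List Int → α) (l : List Int) (d : α) :
    ((l.tails).map f).headD d = f l := by
  cases l <;> simp

theorem rowB_spec (k : Nat) : ∀ xs : List Int,
    rowB (k + 1) xs ((xs.tails).map (fun t => SA t k)) = (xs.tails).map (fun t => SA t (k + 1)) := by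
  intro xs
  induction xs with
  | nil => simp [rowB, SA, PySem.List.combinations_nil_succ]
  | cons x rest ih =>
    rw [List.tails_cons, List.map_cons]
    rw [rowB]
    simp only [List.tail_cons]
    rw [ih]
    simp only [headD_map_tails]
    by_cases hk : k + 1 ≤ rest.length + 1
    · rw [if_pos hk]
      congr 1
      show (SA rest k).map (fun s => x + s) ++ SA rest (k + 1) = SA (x :: rest) (k + 1)
      unfold SA
      rw [PySem.List.combinations_cons_succ, List.map_append, List.map_map, List.map_map]
      rfl
    · rw [if_neg hk]
      have hlen : (x :: rest).length < k + 1 := by simp; omega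
      rw [List.map_cons]
      congr 1
      unfold SA
      rw [PySem.List.combinations_eq_nil_of_length_lt _ hlen]
      simp

theorem scanA_find (hap : PySem.Dict Int (List Int)) (target : Int) (size : Nat) (l : List Int) :
    scanA hap target size l =
      (l.find? (fun h => decide (h ≠ 0) && decide (PySem.Int.mod target h = 0))).map
        (fun h =>
          let result := PySem.Int.floordiv target h
          let c := check hap result
          if c = -1 then result * (size : Int) else c * (size : Int)) := by
  induction l with
  | nil => simp [scanA]
  | cons h hs ih =>
    by_cases h0 : h = 0
    · simp [scanA, h0, List.find?, ih]
    · by_cases hm : PySem.Int.mod target h = 0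
      · simp [scanA, h0, hm, List.find?]
      · simp [scanA, h0, hm, List.find?, ih]

theorem find?_max_of_pairwise (p : Int → Bool) :
    ∀ (L : List Int), List.Pairwise (fun a b => b ≤ a) L →
      ∀ h, L.find? p = some h → ∀ y ∈ L, p y = true → y ≤ h := by
  intro L
  induction L with
  | nil => simp
  | cons a t ih =>
    intro hp h hf y hy hpy
    rcases List.pairwise_cons.mp hp with ⟨ha, ht⟩
    by_cases hpa : p a = true
    · rw [List.find?_cons_of_pos hpa] at hf
      have hah : a = h := by injection hf
      subst hah
      rcases List.mem_cons.mp hy with rfl | hy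
      · exact le_refl _
      · exact ha y hy
    · rw [List.find?_cons_of_neg hpa] at hf
      rcases List.mem_cons.mp hy with rfl | hy
      · exact absurd hpy hpa
      · exact ih ht h hf y hy hpy

theorem max_filter_eq_find (p : Int → Bool) (L L' : List Int)
    (hs : List.Pairwise (fun a b : Int => b ≤ a) L) (hm : ∀ y : Int, y ∈ L ↔ y ∈ L') :
    PySem.List.max? (L'.filter p) (fun y => y) = L.find? p := by
  cases hf : L.find? p with
  | none =>
    rw [List.find?_eq_none] at hf
    rw [PySem.List.max?_eq_none_iff]
    rw [List.filter_eq_nil_iff]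
    intro y hy
    exact hf y ((hm y).mpr hy)
  | some h =>
    have hhL : h ∈ L := List.mem_of_find?_eq_some hf
    have hph : p h = true := List.find?_some hf
    have hmax := find?_max_of_pairwise p L hs h hf
    have hhf : h ∈ L'.filter p := List.mem_filter.mpr ⟨(hm h).mp hhL, hph⟩
    cases hM : PySem.List.max? (L'.filter p) (fun y => y) with
    | none =>
      rw [PySem.List.max?_eq_none_iff] at hM
      rw [hM] at hhf; simp at hhf
    | some mv =>
      have hmem := PySem.List.max?_mem hM
      rcases List.mem_filter.mp hmem with ⟨hmL', hpm⟩
      have h1 : mv ≤ h := hmax mv ((hm mv).mpr hmL') hpm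
      have h2 : h ≤ mv := PySem.List.max?_isMax hM h hhf
      have : mv = h := le_antisymm h1 h2
      rw [this]

theorem findJ_ge (r : Int) : ∀ (tops : List (List Int)) (a j : Nat), findJ r tops a = some j → a ≤ j := by
  intro tops
  induction tops with
  | nil => intro a j h; simp [findJ] at h
  | cons t ts ih =>
    intro a j h
    by_cases hc : r ∈ t
    · simp [findJ, hc] at h; omega
    · simp [findJ, hc] at h
      have := ih (a + 1) j h
      omega

theorem check_align (d : PySem.Dict Int (List Int)) (r : Int) :
    ∀ (tops : List (List Int)) (a : Nat),
      (∀ idx, idx < tops.length →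
        (d.getD (((a + idx : Nat) : Int) + 1) []).contains r = (tops.getD idx []).contains r) →
      checkGo d r (List.range' a tops.length) =
        match findJ r tops (a + 1) with
        | some j => (j : Int) - 1
        | none => -1 := by
  intro tops
  induction tops with
  | nil => intro a _; simp [checkGo, findJ]
  | cons t ts ih =>
    intro a hgd
    have h0 := hgd 0 (by simp)
    simp at h0
    rw [List.length_cons, List.range'_succ]
    by_cases hc : r ∈ t
    · simp [checkGo, findJ, h0, hc]
    · have hrec := ih (a + 1) (by
        intro idx hidx
        have := hgd (idx + 1) (by simpa using Nat.succ_lt_succ hidx)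
        simpa [Nat.add_assoc, Nat.add_comm 1 idx, Nat.add_left_comm] using this)
      simp [checkGo, findJ, h0, hc, hrec]


theorem contains_congr (r : Int) (L1 L2 : List Int) (h : ∀ y : Int, y ∈ L1 ↔ y ∈ L2) :
    L1.contains r = L2.contains r := by
  simp only [List.contains_eq_mem]
  exact decide_eq_decide.mpr (h r)

theorem loop_eq (numbers : List Int) (target : Int) :
    ∀ (m i : Nat),
      loopA numbers target (List.range' i m)
        (PySem.Dict.mk ((List.range' 1 i).map
          (fun j : Nat => ((j : Int), PySem.List.sorted (SA numbers j) (fun y => y) true)))) =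
      loopB numbers target (List.range' (i + 1) m)
        ((numbers.tails).map (fun t => SA t i))
        ((List.range' 1 i).map (fun j : Nat => SA numbers j)) := by
  intro m
  induction m with
  | zero => intro i; simp [loopA, loopB]
  | succ m ih =>
    intro i
    rw [List.range'_succ, List.range'_succ]
    set f := fun j : Nat => ((j : Int), PySem.List.sorted (SA numbers j) (fun y => y) true) with hf
    set hap := PySem.Dict.mk ((List.range' 1 i).map f) with hhap
    -- A side ingredients
    have hsums : (PySem.List.combinations numbers (i + 1)).foldl (fun acc c => acc ++ [c.sum]) [] =
        SA numbers (i + 1) := by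
      rw [PySem.List.foldl_append_singleton_eq_map]; rfl
    have hkeys : hap.keys = (List.range' 1 i).map (fun j : Nat => (j : Int)) := by
      simp [hhap, PySem.Dict.keys, hf]
    have hnc : hap.contains ((i : Int) + 1) = false := by
      rw [← Bool.not_eq_true, PySem.Dict.contains_iff_mem_keys, hkeys]
      intro hc
      rcases List.mem_map.mp hc with ⟨j, hj, hje⟩
      rcases List.mem_range'_1.mp hj with ⟨h1, h2⟩
      omega
    have h1i : List.range' 1 (i + 1) = List.range' 1 i ++ [i + 1] := by
      rw [List.range'_concat]
      congr 2
      omega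
    have hitems : (hap.insert ((i : Int) + 1)
        (PySem.List.sorted (SA numbers (i + 1)) (fun y => y) true)).items =
        (List.range' 1 (i + 1)).map f := by
      rw [PySem.Dict.items_insert_of_not_contains _ _ hnc, h1i, List.map_append]
      simp [hhap, hf]
    have hinsert : hap.insert ((i : Int) + 1)
        (PySem.List.sorted (SA numbers (i + 1)) (fun y => y) true) =
        PySem.Dict.mk ((List.range' 1 (i + 1)).map f) := by
      apply PySem.Dict.ext; exact hitems
    set hap' := PySem.Dict.mk ((List.range' 1 (i + 1)).map f) with hhap'
    have hnodup : hap'.keys.Nodup := by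
      have : hap'.keys = (List.range' 1 (i + 1)).map (fun j : Nat => (j : Int)) := by
        simp [hhap', PySem.Dict.keys, hf]
      rw [this]
      exact (List.nodup_range').map (fun a b => by omega)
    have hgetD : ∀ j : Nat, 1 ≤ j → j ≤ i + 1 →
        hap'.getD ((j : Int)) [] = PySem.List.sorted (SA numbers j) (fun y => y) true := by
      intro j h1 h2
      apply PySem.Dict.getD_of_mem_items _ _ hnodup
      show ((j : Int), _) ∈ _
      exact List.mem_map.mpr ⟨j, List.mem_range'_1.mpr ⟨h1, by omega⟩, rfl⟩
    -- B side ingredients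
    have hcur : rowB (i + 1) numbers ((numbers.tails).map (fun t => SA t i)) =
        (numbers.tails).map (fun t => SA t (i + 1)) := rowB_spec i numbers
    have hrow : ((numbers.tails).map (fun t => SA t (i + 1))).headD [] = SA numbers (i + 1) :=
      headD_map_tails _ _ _
    have htop : (List.range' 1 i).map (fun j : Nat => SA numbers j) ++ [SA numbers (i + 1)] =
        (List.range' 1 (i + 1)).map (fun j : Nat => SA numbers j) := by
      rw [h1i, List.map_append]
      rfl
    -- the h-scan comparison
    set p : Int → Bool := fun h => decide (h ≠ 0) && decide (PySem.Int.mod target h = 0) with hp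
    set sortedL := PySem.List.sorted (SA numbers (i + 1)) (fun y => y) true with hsorted
    have hpw : List.Pairwise (fun a b : Int => b ≤ a) sortedL :=
      PySem.List.sorted_pairwise_rev (SA numbers (i + 1)) (fun y => y)
    have hmemiff : ∀ y : Int, y ∈ sortedL ↔ y ∈ SA numbers (i + 1) := fun y =>
      PySem.List.mem_sorted _ _ _ y
    have hmaxfind := max_filter_eq_find p sortedL (SA numbers (i + 1)) hpw hmemiff
    show loopA numbers target (i :: List.range' (i + 1) m) hap =
      loopB numbers target ((i + 1) :: List.range' (i + 1 + 1) m) _ _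
    rw [loopA, loopB]
    simp only [hsums, hinsert, hcur, hrow, ← hsorted, ← hp, htop]
    rw [scanA_find]
    cases hfind : sortedL.find? p with
    | none =>
      rw [hfind] at hmaxfind
      have hcands : (SA numbers (i + 1)).filter p = [] :=
        (PySem.List.max?_eq_none_iff _ _).mp hmaxfind
      rw [hcands]
      simp only [List.isEmpty_nil, if_true, Option.map_none]
      exact ih (i + 1)
    | some h =>
      rw [hfind] at hmaxfind
      have hcandsne : (SA numbers (i + 1)).filter p ≠ [] := by
        intro hc
        rw [hc] at hmaxfind
        simp [PySem.List.max?] at hmaxfind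
      rw [if_neg (by simpa using hcandsne)]
      simp only [hmaxfind, Option.getD_some, Option.map_some]
      -- check vs findJ
      set r := PySem.Int.floordiv target h with hr
      set top' := (List.range' 1 (i + 1)).map (fun j : Nat => SA numbers j) with htop'
      have hlen : top'.length = i + 1 := by simp [htop']
      have hsize : hap'.size = i + 1 := by
        show hap'.items.length = i + 1
        simp [hhap']
      have halign : checkGo hap' r (List.range' 0 top'.length) =
          match findJ r top' (0 + 1) with
          | some j => (j : Int) - 1
          | none => -1 := by
        apply check_align
        intro idx hidx
        rw [hlen] at hidx
        have hg : hap'.getD (((0 + idx : Nat) : Int) + 1) [] =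
            PySem.List.sorted (SA numbers (idx + 1)) (fun y => y) true := by
          have : (((0 + idx : Nat) : Int) + 1) = (((idx + 1 : Nat)) : Int) := by push_cast; ring
          rw [this]
          exact hgetD (idx + 1) (by omega) (by omega)
        rw [hg]
        have hgt : top'.getD idx [] = SA numbers (idx + 1) := by
          rw [htop', List.getD_eq_getElem?_getD, List.getElem?_map]
          rw [List.getElem?_range' (by omega)]
          simp [Nat.add_comm]
        rw [hgt]
        exact contains_congr r _ _ (fun y => PySem.List.mem_sorted _ _ _ y)
      have hcheck : check hap' r = match findJ r top' 1 with
          | some j => (j : Int) - 1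
          | none => -1 := by
        rw [check, hsize, List.range_eq_range', ← hlen]
        exact halign
      cases hJ : findJ r top' 1 with
      | none =>
        simp only [hcheck, hJ]
        rfl
      | some j =>
        have hj1 : 1 ≤ j := findJ_ge r top' 1 j hJ
        simp only [hcheck, hJ]
        rw [if_neg (by omega : ¬((j : Int) - 1 = -1))]

-- ===== VERDICT (by name: the statement is the Claim_ definition above) =====
theorem solution_spec : Claim_equal_solution := by
  intro numbers target _
  unfold Spec_solution solution solution_alt
  have h := loop_eq numbers target numbers.length 0
  simpa [SA, List.range_eq_range', PySem.List.combinations_zero,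
    List.map_const', List.length_tails, PySem.Dict.empty] using h
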